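-- pv_equiv track=rewrite | github.com/iamnotwhale/GEQR090 | assignment04/tagged2context_2.py | get_index_terms
-- ===== SOURCE A (Python) =====
-- def get_index_terms( mt_list):
--     #input: list of tuples [(형태소, 품사), ...], 어절 단위
--     terms = []
--     search_list = ['NNG', 'NNP', 'NR', 'NNB', 'SL', 'SH', 'SN']
--
--     wordhap = ''
--
--     for i in range(len(mt_list)):
--         if mt_list[i][1] in search_list:
--             if mt_list[i][1] in ['NR', 'NNB', 'SN']:
--                 wordhap += mt_list[i][0]
--                 continue
--             elif mt_list[i][1] == 'SL':
--                 if len(mt_list) == 1: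
--                     wordhap += mt_list[i][0]
--                     continue
--                 elif i != 0 and i != len(mt_list)-1:
--                     if mt_list[i-1][1] in search_list or mt_list[i+1][1] in search_list:
--                         wordhap += mt_list[i][0]
--                         continue
--                     else:
--                         wordhap += '/'
--                         continue
--                 elif i == 0:
--                     if mt_list[i+1][1] in search_list:
--                         wordhap += mt_list[i][0]
--                         continue
--                     else:
--                         wordhap += '/'
--                         continue
--                 else:
--                     if mt_list[i-1][1] in search_list:
--                         wordhap += mt_list[i][0]
--                         continue
--                     else:
--                         wordhap += '/'
--                         continue
--             terms.append(mt_list[i][0])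
--             wordhap += mt_list[i][0]
--         else:
--             wordhap += '/'
--
--     wordhaplist = wordhap.split('/')
--     count = wordhaplist.count('')
--
--     i = 0
--     while i < count:
--         wordhaplist.remove('')
--         i += 1
--
--     for word in wordhaplist:
--         if word not in terms:
--             terms.append(word)
--
--     return terms
-- ===== SOURCE B (Python) =====
-- def get_index_terms(mt_list):
--     # B: classifies each morpheme once into an optional "piece" (None = run break),
--     # collapsing A's nested SL neighbour branches into one boolean; plain nouns are
--     # collected by a comprehension and runs are grouped directly, with no delimiter
--     # string and no split/count/remove post-pass.
--     SEARCH = frozenset(('NNG', 'NNP', 'NR', 'NNB', 'SL', 'SH', 'SN'))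
--     n = len(mt_list)
--
--     def piece(i):
--         word, tag = mt_list[i][0], mt_list[i][1]
--         if tag not in SEARCH:
--             return None
--         if tag == 'SL':
--             ok = (n == 1
--                   or (i > 0 and mt_list[i - 1][1] in SEARCH)
--                   or (i + 1 < n and mt_list[i + 1][1] in SEARCH))
--             return word if ok else None
--         return word
--
--     terms = [p[0] for p in mt_list if p[1] in ('NNG', 'NNP', 'SH')]
--
--     seg = ''
--     for piece_i in (piece(i) for i in range(n)):
--         if piece_i is None:
--             if seg and seg not in terms:
--                 terms.append(seg)
--             seg = ''
--         else:
--             seg += piece_i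
--     if seg and seg not in terms:
--         terms.append(seg)
--     return terms
-- ===== Notes on version B (the rewrite author's own statement) =====
-- stated objective: alternative
-- what changed: B replaces A's '/'-delimited accumulator string (built, then split('/'), counted and purged of '' by a while/remove loop) with a per-morpheme classifier returning an optional run piece (A's nested SL neighbour branches collapsed into one boolean), a comprehension collecting the plain nouns, and a direct run-grouping loop that skips empty runs.
-- outside the precondition, e.g. on get_index_terms([('ab/c', 'NNG')]): A returns ['ab/c', 'ab', 'c'], B returns ['ab/c']
import Mathlib
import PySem

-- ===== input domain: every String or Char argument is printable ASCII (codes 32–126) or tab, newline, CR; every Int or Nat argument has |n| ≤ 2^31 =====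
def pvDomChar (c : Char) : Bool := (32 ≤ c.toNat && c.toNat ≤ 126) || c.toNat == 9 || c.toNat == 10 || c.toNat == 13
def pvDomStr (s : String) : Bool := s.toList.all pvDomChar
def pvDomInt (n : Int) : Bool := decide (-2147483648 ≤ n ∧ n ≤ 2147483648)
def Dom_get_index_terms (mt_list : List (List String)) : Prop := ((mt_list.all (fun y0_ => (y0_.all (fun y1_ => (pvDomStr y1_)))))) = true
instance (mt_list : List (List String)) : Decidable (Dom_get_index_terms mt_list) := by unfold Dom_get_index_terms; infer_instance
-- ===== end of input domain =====

-- B classifies each morpheme once into an optional run piece (None = break), collapsing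
-- A's nested SL neighbour branches into one boolean, collects plain nouns by a
-- comprehension, and groups runs directly — no '/'-string, no split/count/remove pass.

-- ===== PORT A =====
def pvSearchList : List String := ["NNG", "NNP", "NR", "NNB", "SL", "SH", "SN"]
def pvTag (mt : List (List String)) (i : Int) : String :=
  PySem.List.pyGetD (PySem.List.pyGetD mt i []) 1 ""
def pvContent (mt : List (List String)) (i : Int) : String :=
  PySem.List.pyGetD (PySem.List.pyGetD mt i []) 0 ""

-- loop body of A: state = (terms, wordhap)  (strings kept as List Char)
def pvStepA (mt : List (List String)) (s : List (List Char) × List Char) (i : Int) :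
    List (List Char) × List Char :=
  let (terms, w) := s
  if pvTag mt i ∈ pvSearchList then
    if pvTag mt i ∈ (["NR", "NNB", "SN"] : List String) then
      (terms, w ++ (pvContent mt i).toList)
    else if pvTag mt i = "SL" then
      if mt.length = 1 then
        (terms, w ++ (pvContent mt i).toList)
      else if i ≠ 0 ∧ i ≠ (mt.length : Int) - 1 then
        if pvTag mt (i - 1) ∈ pvSearchList ∨ pvTag mt (i + 1) ∈ pvSearchList then
          (terms, w ++ (pvContent mt i).toList)
        else (terms, w ++ ['/'])
      else if i = 0 then
        if pvTag mt (i + 1) ∈ pvSearchList then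
          (terms, w ++ (pvContent mt i).toList)
        else (terms, w ++ ['/'])
      else
        if pvTag mt (i - 1) ∈ pvSearchList then
          (terms, w ++ (pvContent mt i).toList)
        else (terms, w ++ ['/'])
    else
      (terms ++ [(pvContent mt i).toList], w ++ (pvContent mt i).toList)
  else (terms, w ++ ['/'])

def get_index_terms (mt_list : List (List String)) : List String :=
  let s := (PySem.List.pyRange 0 (mt_list.length : Int) 1).foldl (pvStepA mt_list) ([], [])
  let wordhaplist := PySem.Chars.splitOn s.2 ['/']
  let count := PySem.List.count wordhaplist ([] : List Char)
  let wl := (PySem.List.pyRange 0 (count : Int) 1).foldl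
    (fun l _ => (PySem.List.remove? l ([] : List Char)).getD l) wordhaplist
  let terms := wl.foldl (fun t word => if word ∈ t then t else t ++ [word]) s.1
  terms.map String.ofList

-- ===== PORT B =====
def altSearch : List String := ["NNG", "NNP", "NR", "NNB", "SL", "SH", "SN"]

-- piece(i): the run contribution of morpheme i, or none for a run break
def altPiece (mt : List (List String)) (n i : Nat) : Option (List Char) :=
  let word := ((mt.getD i []).getD 0 "").toList
  let tag := (mt.getD i []).getD 1 ""
  if tag ∈ altSearch then
    if tag = "SL" then
      if n = 1 ∨ (0 < i ∧ (mt.getD (i - 1) []).getD 1 "" ∈ altSearch)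
          ∨ (i + 1 < n ∧ (mt.getD (i + 1) []).getD 1 "" ∈ altSearch)
      then some word else none
    else some word
  else none

-- 'if seg and seg not in terms: terms.append(seg)'
def altFlush (terms : List (List Char)) (seg : List Char) : List (List Char) :=
  if seg ≠ [] ∧ seg ∉ terms then terms ++ [seg] else terms

-- one iteration of B's grouping loop
def altStep (st : List (List Char) × List Char) (pc : Option (List Char)) :
    List (List Char) × List Char :=
  match pc with
  | none => (altFlush st.1 st.2, ([] : List Char))
  | some p => (st.1, st.2 ++ p)

def get_index_terms_alt (mt_list : List (List String)) : List String :=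
  let n := mt_list.length
  let terms0 := mt_list.filterMap (fun p =>
    if p.getD 1 "" ∈ (["NNG", "NNP", "SH"] : List String) then some (p.getD 0 "").toList
    else none)
  let s := ((List.range n).map (altPiece mt_list n)).foldl altStep
    (terms0, ([] : List Char))
  (altFlush s.1 s.2).map String.ofList

-- ===== PRECONDITION & SPEC =====
-- Pre_ (i) keeps exactly the inputs A returns on w.r.t. indexing: A reads mt_list[i][1]
-- for every i (IndexError on a shorter inner tuple), so every inner list needs length ≥ 2;
-- (ii) excludes inputs where a morpheme whose POS tag is in the noun search list contains
-- '/', the character A reserves internally as the run delimiter: on such inputs which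
-- terms come out is an accident of that encoding (A may split the morpheme at its
-- slashes), a corner no caller would specify either way.
def Pre_get_index_terms (mt_list : List (List String)) : Prop :=
  (∀ p ∈ mt_list, 2 ≤ p.length) ∧
  (∀ p ∈ mt_list, p.getD 1 "" ∈ pvSearchList → '/' ∉ (p.getD 0 "").toList)
instance (mt_list : List (List String)) : Decidable (Pre_get_index_terms mt_list) := by
  unfold Pre_get_index_terms; infer_instance
def pvWitness_get_index_terms : List (List String) := [["seoul", "NNP"], ["2", "SN"]]

def Spec_get_index_terms (mt_list : List (List String)) (out : List String) : Prop :=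
  out = get_index_terms_alt mt_list
instance (mt_list : List (List String)) (out : List String) :
    Decidable (Spec_get_index_terms mt_list out) := by
  unfold Spec_get_index_terms; infer_instance

-- ===== CLAIM =====
def Claim_equal_get_index_terms : Prop := ∀ (mt_list : List (List String)), Dom_get_index_terms mt_list → Pre_get_index_terms mt_list → Spec_get_index_terms mt_list (get_index_terms mt_list)

-- ===== LEMMAS AND PROOFS =====

-- rendering a piece back into A's wordhap fragment
def pvRend : Option (List Char) → List Char
  | none => ['/']
  | some p => p

-- A's first-pass term contribution of morpheme j
def pvPlain (mt : List (List String)) (j : Nat) : List (List Char) :=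
  if (mt.getD j []).getD 1 "" ∈ (["NNG", "NNP", "SH"] : List String) then
    [((mt.getD j []).getD 0 "").toList]
  else []

theorem pvTag_nat (mt : List (List String)) (j : Nat) (h : j < mt.length) :
    pvTag mt (j : Int) = (mt.getD j []).getD 1 "" := by
  rw [pvTag, PySem.List.pyGetD_eq_getElem mt _ (by positivity) (by exact_mod_cast h)]
  simp [pysem, List.getD, List.getElem?_eq_getElem h]

theorem pvContent_nat (mt : List (List String)) (j : Nat) (h : j < mt.length) :
    pvContent mt (j : Int) = (mt.getD j []).getD 0 "" := by
  rw [pvContent, PySem.List.pyGetD_eq_getElem mt _ (by positivity) (by exact_mod_cast h)]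
  simp [pysem, List.getD, List.getElem?_eq_getElem h]

-- one step of A = append the plain-term contribution and the rendered piece
theorem pvStepA_eq (mt : List (List String)) (j : Nat) (hj : j < mt.length)
    (t : List (List Char)) (w : List Char) :
    pvStepA mt (t, w) (j : Int)
      = (t ++ pvPlain mt j, w ++ pvRend (altPiece mt mt.length j)) := by
  have htag := pvTag_nat mt j hj
  have hcont := pvContent_nat mt j hj
  simp only [pvStepA, altPiece, pvPlain, htag, hcont]
  rcases em ((mt.getD j []).getD 1 "" ∈ pvSearchList) with hS | hS
  · have hS' := hS
    simp only [pvSearchList, List.mem_cons, List.not_mem_nil, or_false] at hS'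
    rcases hS' with h | h | h | h | h | h | h
    · rw [h]; simp [pvSearchList, altSearch, pvRend]
    · rw [h]; simp [pvSearchList, altSearch, pvRend]
    · rw [h]; simp [pvSearchList, altSearch, pvRend]
    · rw [h]; simp [pvSearchList, altSearch, pvRend]
    · -- the SL case
      rw [h]
      rw [if_pos (show ("SL" : String) ∈ pvSearchList by simp [pvSearchList]),
        if_neg (show ("SL" : String) ∉ (["NR", "NNB", "SN"] : List String) by simp),
        if_pos rfl,
        if_pos (show ("SL" : String) ∈ altSearch by simp [altSearch]),
        if_pos rfl,
        if_neg (show ("SL" : String) ∉ (["NNG", "NNP", "SH"] : List String) by simp)]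
      by_cases h1 : mt.length = 1
      · rw [if_pos h1, if_pos (Or.inl h1)]
        simp [pvRend]
      · rw [if_neg h1]
        have hn1 : 1 ≤ mt.length := by omega
        by_cases hmid : (j : Int) ≠ 0 ∧ (j : Int) ≠ (mt.length : Int) - 1
        · have hj0 : 0 < j := by omega
          have hj1 : j + 1 < mt.length := by omega
          have hp : ((j : Int) - 1) = ((j - 1 : Nat) : Int) := by omega
          have hq : ((j : Int) + 1) = ((j + 1 : Nat) : Int) := by omega
          rw [if_pos hmid, hp, hq,
            pvTag_nat mt (j - 1) (by omega), pvTag_nat mt (j + 1) (by omega)]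
          by_cases hor : (mt.getD (j - 1) []).getD 1 "" ∈ pvSearchList
            ∨ (mt.getD (j + 1) []).getD 1 "" ∈ pvSearchList
          · rw [if_pos hor, if_pos]
            · simp [pvRend]
            · rcases hor with hx | hx
              · exact Or.inr (Or.inl ⟨hj0, hx⟩)
              · exact Or.inr (Or.inr ⟨hj1, hx⟩)
          · rw [if_neg hor, if_neg]
            · simp [pvRend]
            · push Not at hor
              rintro (hx | ⟨_, hx⟩ | ⟨_, hx⟩)
              · omega
              · exact hor.1 hx
              · exact hor.2 hx
        · by_cases hj0 : (j : Int) = 0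
          · have hj0' : j = 0 := by omega
            subst hj0'
            have hq : (((0 : Nat) : Int) + 1) = ((1 : Nat) : Int) := by omega
            rw [if_neg hmid, if_pos hj0, hq, pvTag_nat mt 1 (by omega)]
            by_cases hnx : (mt.getD 1 []).getD 1 "" ∈ pvSearchList
            · rw [if_pos hnx, if_pos (Or.inr (Or.inr ⟨by omega, hnx⟩))]
              simp [pvRend]
            · rw [if_neg hnx, if_neg]
              · simp [pvRend]
              · rintro (hx | ⟨hx, _⟩ | ⟨_, hx⟩)
                · omega
                · omega
                · exact hnx hx
          · have hlast : j = mt.length - 1 := by omega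
            have hj1 : 0 < j := by omega
            have hp : ((j : Int) - 1) = ((j - 1 : Nat) : Int) := by omega
            rw [if_neg hmid, if_neg hj0, hp, pvTag_nat mt (j - 1) (by omega)]
            by_cases hpr : (mt.getD (j - 1) []).getD 1 "" ∈ pvSearchList
            · rw [if_pos hpr, if_pos (Or.inr (Or.inl ⟨hj1, hpr⟩))]
              simp [pvRend]
            · rw [if_neg hpr, if_neg]
              · simp [pvRend]
              · rintro (hx | ⟨_, hx⟩ | ⟨hx, _⟩)
                · omega
                · exact hpr hx
                · omega
    · rw [h]; simp [pvSearchList, altSearch, pvRend]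
    · rw [h]; simp [pvSearchList, altSearch, pvRend]
  · have hS' : (mt.getD j []).getD 1 "" ∉ altSearch := hS
    have hplain : (mt.getD j []).getD 1 "" ∉ (["NNG", "NNP", "SH"] : List String) := by
      intro hm
      apply hS
      simp only [List.mem_cons, List.not_mem_nil, or_false] at hm
      rcases hm with hx | hx | hx <;> rw [hx] <;> simp [pvSearchList]
    rw [if_neg hS, if_neg hS', if_neg hplain]
    simp [pvRend]

-- A's whole first pass, over any in-range index list
theorem pvFoldA (mt : List (List String)) (js : List Nat)
    (h : ∀ j ∈ js, j < mt.length) (t : List (List Char)) (w : List Char) :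
    (js.map (Nat.cast : Nat → Int)).foldl (pvStepA mt) (t, w)
      = (t ++ js.flatMap (pvPlain mt),
         w ++ js.flatMap (fun j => pvRend (altPiece mt mt.length j))) := by
  induction js generalizing t w with
  | nil => simp
  | cons j js ih =>
    simp only [List.map_cons, List.foldl_cons, List.flatMap_cons]
    rw [pvStepA_eq mt j (h j (List.mem_cons_self ..)) t w,
      ih (fun x hx => h x (List.mem_cons_of_mem _ hx))]
    simp

theorem pvRange_cast (n : Nat) :
    PySem.List.pyRange 0 (n : Int) 1 = (List.range n).map (Nat.cast : Nat → Int) := by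
  rw [PySem.List.pyRange_one]
  simp

-- (range n).flatMap of a getD-based function collapses to a flatMap over the list itself
theorem pvFlatMap_range {α β : Type} (l : List α) (d : α) (g : α → List β) :
    (List.range l.length).flatMap (fun j => g (l.getD j d)) = l.flatMap g := by
  induction l using List.reverseRecOn with
  | nil => simp
  | append_singleton l x ih =>
    rw [List.length_append, List.length_singleton, List.range_succ, List.flatMap_append,
      List.flatMap_append]
    congr 1
    · rw [← ih]
      apply List.flatMap_congr
      intro j hj
      have hj' : j < l.length := List.mem_range.mp hj
      rw [List.getD_append _ _ _ _ hj']
    · simp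

theorem pvFlatMap_singleton_ite {α β : Type} (l : List α) (c : α → Prop) [DecidablePred c]
    (f : α → β) :
    l.flatMap (fun x => if c x then [f x] else []) =
      l.filterMap (fun x => if c x then some (f x) else none) := by
  induction l with
  | nil => rfl
  | cons x l ih =>
    by_cases hx : c x <;> simp [hx, ih]

-- reference splitter for sep = "/" (what splitOn computes, without fuel)
def pvSplit : List Char → List Char → List (List Char)
  | pre, [] => [pre]
  | pre, c :: rest => if c = '/' then pre :: pvSplit [] rest else pvSplit (pre ++ [c]) rest

theorem pvGo_eq (fuel : Nat) (l cur : List Char) (acc : List (List Char))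
    (h : l.length < fuel) :
    PySem.Chars.splitOn.go ['/'] fuel l cur acc = acc.reverse ++ pvSplit cur.reverse l := by
  induction fuel generalizing l cur acc with
  | zero => omega
  | succ fuel ih =>
    cases l with
    | nil => simp [PySem.Chars.splitOn.go, pvSplit]
    | cons c rest =>
      by_cases hc : c = '/'
      · subst hc
        rw [PySem.Chars.splitOn.go]
        simp only [List.isPrefixOf, BEq.rfl, Bool.true_and, if_true]
        rw [ih _ _ _ (by simpa using Nat.lt_of_succ_lt_succ h)]
        simp [pvSplit]
      · rw [PySem.Chars.splitOn.go]
        have : (['/'].isPrefixOf (c :: rest)) = false := by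
          simp [List.isPrefixOf]
          exact fun h => hc h.symm
        rw [this]
        simp only [Bool.false_eq_true, if_false]
        rw [ih _ _ _ (by simpa using Nat.lt_of_succ_lt_succ h)]
        simp [pvSplit, hc]

theorem pvSplitOn_eq (l : List Char) :
    PySem.Chars.splitOn l ['/'] = pvSplit [] l := by
  rw [PySem.Chars.splitOn, pvGo_eq _ _ _ _ (Nat.lt_succ_self _)]
  rfl

theorem pvSplit_noslash (p : List Char) (hp : '/' ∉ p) :
    ∀ pre rest, pvSplit pre (p ++ rest) = pvSplit (pre ++ p) rest := by
  induction p with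
  | nil => simp
  | cons c p ih =>
    intro pre rest
    have hc : ¬ c = '/' := fun h => hp (h ▸ List.mem_cons_self ..)
    simp only [List.cons_append, pvSplit, if_neg hc]
    rw [ih (fun h => hp (List.mem_cons_of_mem _ h))]
    simp

-- grouping the pieces into segments (what pvSplit does to the rendered pieces)
def pvGroup : List Char → List (Option (List Char)) → List (List Char)
  | cur, [] => [cur]
  | cur, none :: r => cur :: pvGroup [] r
  | cur, some p :: r => pvGroup (cur ++ p) r

theorem pvSplit_rend (pieces : List (Option (List Char)))
    (hns : ∀ p, some p ∈ pieces → '/' ∉ p) :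
    ∀ pre, pvSplit pre (pieces.flatMap pvRend) = pvGroup pre pieces := by
  induction pieces with
  | nil => intro pre; rfl
  | cons pc r ih =>
    intro pre
    cases pc with
    | none =>
      simp only [List.flatMap_cons, pvRend, List.singleton_append, pvSplit, pvGroup,
        if_true]
      rw [ih (fun p hp => hns p (List.mem_cons_of_mem _ hp))]
    | some p =>
      simp only [List.flatMap_cons, pvRend, pvGroup]
      rw [pvSplit_noslash p (hns p (List.mem_cons_self ..)),
        ih (fun q hq => hns q (List.mem_cons_of_mem _ hq))]

-- B's grouping fold = A's dedup fold over the nonempty segments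
theorem pvGroupFold (pieces : List (Option (List Char))) :
    ∀ (t : List (List Char)) (seg : List Char),
      altFlush (pieces.foldl altStep (t, seg)).1 (pieces.foldl altStep (t, seg)).2
      = ((pvGroup seg pieces).filter (fun y => y ≠ [])).foldl
          (fun t word => if word ∈ t then t else t ++ [word]) t := by
  induction pieces with
  | nil =>
    intro t seg
    by_cases h0 : seg = ([] : List Char)
    · simp [pvGroup, altFlush, h0]
    · by_cases hm : seg ∈ t <;> simp [pvGroup, altFlush, h0, hm]
  | cons pc r ih =>
    intro t seg
    cases pc with
    | none =>
      have hstep : altStep (t, seg) none = (altFlush t seg, ([] : List Char)) := rfl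
      rw [List.foldl_cons, hstep, ih (altFlush t seg) []]
      by_cases h0 : seg = ([] : List Char)
      · simp [pvGroup, h0, altFlush]
      · by_cases hm : seg ∈ t <;>
          simp [pvGroup, h0, hm, altFlush]
    | some p =>
      have hstep : altStep (t, seg) (some p) = (t, seg ++ p) := rfl
      rw [List.foldl_cons, hstep, pvGroup]
      exact ih t (seg ++ p)

-- how many removals: count '' then remove '' that many times = filter out ''
theorem pvFoldl_const {α β : Type} (L : List β) (f : α → α) (init : α) :
    L.foldl (fun a _ => f a) init = f^[L.length] init := by
  induction L generalizing init with
  | nil => rfl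
  | cons x L ih => simp [List.foldl_cons, ih, Function.iterate_succ_apply]

theorem pvRemove_cons_ne (x y : List Char) (hne : y ≠ x) :
    ∀ (c : Nat) (l : List (List Char)), c ≤ l.count x →
      (fun a => (PySem.List.remove? a x).getD a)^[c] (y :: l)
        = y :: (fun a => (PySem.List.remove? a x).getD a)^[c] l := by
  intro c
  induction c with
  | zero => intro l _; rfl
  | succ c ih =>
    intro l hc
    have hx : x ∈ l := List.count_pos_iff.mp (by omega)
    have h1 : PySem.List.remove? l x = some (l.erase x) := PySem.List.remove?_eq_some_erase l x hx
    have h2 : PySem.List.remove? (y :: l) x = some (y :: l.erase x) := by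
      rw [PySem.List.remove?_cons_of_ne _ hne, h1]; rfl
    rw [Function.iterate_succ_apply, Function.iterate_succ_apply]
    simp only [h1, h2, Option.getD_some]
    exact ih (l.erase x) (by rw [List.count_erase_self]; omega)

theorem pvRemove_count (x : List Char) (l : List (List Char)) :
    (fun a => (PySem.List.remove? a x).getD a)^[l.count x] l = l.filter (· ≠ x) := by
  induction l with
  | nil => simp
  | cons y l ih =>
    by_cases hy : y = x
    · subst hy
      rw [List.count_cons_self, Function.iterate_succ_apply]
      simp only [PySem.List.remove?_cons_self, Option.getD_some]
      rw [ih]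
      simp
    · rw [List.count_cons_of_ne hy, pvRemove_cons_ne x y hy _ l le_rfl, ih]
      simp [hy]

theorem altPiece_some (mt : List (List String)) (n j : Nat) (p : List Char)
    (h : altPiece mt n j = some p) :
    (mt.getD j []).getD 1 "" ∈ altSearch ∧ p = ((mt.getD j []).getD 0 "").toList := by
  unfold altPiece at h
  dsimp only at h
  by_cases h1 : (mt.getD j []).getD 1 "" ∈ altSearch
  · refine ⟨h1, ?_⟩
    rw [if_pos h1] at h
    by_cases h2 : (mt.getD j []).getD 1 "" = "SL"
    · rw [if_pos h2] at h
      by_cases h3 : (n = 1 ∨ (0 < j ∧ (mt.getD (j - 1) []).getD 1 "" ∈ altSearch)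
          ∨ (j + 1 < n ∧ (mt.getD (j + 1) []).getD 1 "" ∈ altSearch))
      · rw [if_pos h3] at h
        exact (Option.some_inj.mp h).symm
      · rw [if_neg h3] at h
        exact absurd h (by simp)
    · rw [if_neg h2] at h
      exact (Option.some_inj.mp h).symm
  · rw [if_neg h1] at h
    exact absurd h (by simp)

theorem pvFlatMap_map {α β γ : Type} (l : List α) (f : α → β) (g : β → List γ) :
    (l.map f).flatMap g = l.flatMap (fun x => g (f x)) := by
  induction l <;> simp_all

-- ===== VERDICT =====
theorem get_index_terms_spec : Claim_equal_get_index_terms := by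
  intro mt _ hpre
  unfold Spec_get_index_terms get_index_terms get_index_terms_alt
  dsimp only
  have hterms : (List.range mt.length).flatMap (pvPlain mt)
      = mt.filterMap (fun p =>
          if p.getD 1 "" ∈ (["NNG", "NNP", "SH"] : List String) then
            some (p.getD 0 "").toList
          else none) :=
    (pvFlatMap_range mt [] (fun p =>
        if p.getD 1 "" ∈ (["NNG", "NNP", "SH"] : List String) then
          [(p.getD 0 "").toList]
        else [])).trans
      (pvFlatMap_singleton_ite mt _ _)
  have hns : ∀ p, some p ∈ (List.range mt.length).map (altPiece mt mt.length) →
      '/' ∉ p := by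
    intro p hp
    obtain ⟨j, hj, hpj⟩ := List.mem_map.mp hp
    have hjlt : j < mt.length := List.mem_range.mp hj
    have hmem : mt.getD j [] ∈ mt := by
      rw [List.getD_eq_getElem mt [] hjlt]
      exact List.getElem_mem hjlt
    obtain ⟨h1, rfl⟩ := altPiece_some mt mt.length j p hpj
    exact hpre.2 _ hmem h1
  rw [pvRange_cast mt.length,
    pvFoldA mt (List.range mt.length) (fun j hj => List.mem_range.mp hj) [] []]
  simp only [List.nil_append]
  rw [← pvFlatMap_map (List.range mt.length) (altPiece mt mt.length) pvRend,
    pvSplitOn_eq, pvSplit_rend _ hns [], pvFoldl_const, PySem.List.length_pyRange_one]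
  rw [show (((PySem.List.count (pvGroup [] ((List.range mt.length).map
        (altPiece mt mt.length))) ([] : List Char) : Int)) - 0).toNat
      = (pvGroup [] ((List.range mt.length).map (altPiece mt mt.length))).count
          ([] : List Char) by
    rw [PySem.List.count_eq]; omega]
  rw [pvRemove_count, hterms, pvGroupFold]
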